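-- pv_equiv track=rewrite | github.com/ShashankNagariyaCoforge/IAT-POC | backend/eml_to_blob.py | _content_type
-- ===== SOURCE A (Python) =====
-- def _content_type(filename: str) -> str:
--     mapping = {
--         ".pdf":  "application/pdf",
--         ".docx": "application/vnd.openxmlformats-officedocument.wordprocessingml.document",
--         ".xlsx": "application/vnd.openxmlformats-officedocument.spreadsheetml.sheet",
--         ".doc":  "application/msword",
--         ".xls":  "application/vnd.ms-excel",
--         ".png":  "image/png",
--         ".jpg":  "image/jpeg",
--         ".jpeg": "image/jpeg",
--         ".gif":  "image/gif",
--         ".txt":  "text/plain",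
--         ".csv":  "text/csv",
--         ".zip":  "application/zip",
--         ".json": "application/json",
--     }
--     for ext, ctype in mapping.items():
--         if filename.lower().endswith(ext):
--             return ctype
--     return "application/octet-stream"
-- ===== SOURCE B (Python) =====
-- def _content_type(filename: str) -> str:
--     mapping = {
--         ".pdf":  "application/pdf",
--         ".docx": "application/vnd.openxmlformats-officedocument.wordprocessingml.document",
--         ".xlsx": "application/vnd.openxmlformats-officedocument.spreadsheetml.sheet",
--         ".doc":  "application/msword",
--         ".xls":  "application/vnd.ms-excel",
--         ".png":  "image/png",
--         ".jpg":  "image/jpeg",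
--         ".jpeg": "image/jpeg",
--         ".gif":  "image/gif",
--         ".txt":  "text/plain",
--         ".csv":  "text/csv",
--         ".zip":  "application/zip",
--         ".json": "application/json",
--     }
--     name = filename.lower()
--     idx = name.rfind(".")
--     if idx == -1:
--         return "application/octet-stream"
--     return mapping.get(name[idx:], "application/octet-stream")
-- ===== Notes on version B (the rewrite author's own statement) =====
-- stated objective: idiomatic
-- what changed: Instead of scanning all 13 mapping entries testing whether the lowercased filename ends with each extension, B locates the last dot of the lowercased name once (returning the default for dotless names) and resolves the suffix with a single dict lookup with a default.
import Mathlib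
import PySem

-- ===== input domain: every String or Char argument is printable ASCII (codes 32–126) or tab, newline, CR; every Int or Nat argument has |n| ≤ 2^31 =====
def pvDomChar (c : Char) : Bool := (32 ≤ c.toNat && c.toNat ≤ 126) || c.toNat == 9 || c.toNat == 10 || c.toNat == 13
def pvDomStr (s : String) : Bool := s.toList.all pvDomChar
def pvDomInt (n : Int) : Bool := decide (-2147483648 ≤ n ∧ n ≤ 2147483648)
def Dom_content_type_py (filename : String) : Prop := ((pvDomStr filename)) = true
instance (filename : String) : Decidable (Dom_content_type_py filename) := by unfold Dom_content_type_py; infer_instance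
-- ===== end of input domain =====

-- B replaces A's linear endswith-scan of the 13 mapping entries by extracting the
-- final extension once (rfind '.') and doing a single dictionary lookup; objective: idiomatic/alternative.

-- the extension → MIME-type table both Pythons contain verbatim
def ctPairs : List (String × String) :=
  [(".pdf",  "application/pdf"),
   (".docx", "application/vnd.openxmlformats-officedocument.wordprocessingml.document"),
   (".xlsx", "application/vnd.openxmlformats-officedocument.spreadsheetml.sheet"),
   (".doc",  "application/msword"),
   (".xls",  "application/vnd.ms-excel"),
   (".png",  "image/png"),
   (".jpg",  "image/jpeg"),
   (".jpeg", "image/jpeg"),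
   (".gif",  "image/gif"),
   (".txt",  "text/plain"),
   (".csv",  "text/csv"),
   (".zip",  "application/zip"),
   (".json", "application/json")]

-- ===== PORT A =====
-- the 'for ext, ctype in mapping.items()' loop with its early return
def ctScan : List (String × String) → String → String
  | [], _ => "application/octet-stream"
  | (ext, ctype) :: rest, filename =>
      if PySem.Str.endswith (PySem.Str.lower filename) ext then ctype
      else ctScan rest filename

def content_type_py (filename : String) : String := ctScan ctPairs filename

-- ===== PORT B =====
def content_type_py_alt (filename : String) : String :=
  let name := PySem.Str.lower filename
  let idx := PySem.Str.rfind name "."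
  if idx == -1 then "application/octet-stream"
  else (PySem.Dict.ofList ctPairs).getD (PySem.Str.slice name (some idx) none)
        "application/octet-stream"

-- ===== PRECONDITION & SPEC =====
def Spec_content_type_py (filename : String) (out : String) : Prop := out = content_type_py_alt filename
instance (filename : String) (out : String) : Decidable (Spec_content_type_py filename out) := by unfold Spec_content_type_py; infer_instance

-- ===== CLAIM (what is proved, stated in full; the proofs are below) =====
def Claim_equal_content_type_py : Prop := ∀ (filename : String), Dom_content_type_py filename → Spec_content_type_py filename (content_type_py filename)

-- ===== LEMMAS AND PROOFS =====

-- rfind.go j returns the highest i ≤ j at which sub occurs, or -1 if none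
theorem rfind_go_spec (s sub : List Char) (j : Nat) :
    (PySem.Chars.rfind.go s sub j = -1 ∧ ∀ i ≤ j, ¬ sub <+: s.drop i) ∨
    (∃ k : Nat, k ≤ j ∧ PySem.Chars.rfind.go s sub j = (k : Int) ∧ sub <+: s.drop k ∧
      ∀ i, k < i → i ≤ j → ¬ sub <+: s.drop i) := by
  induction j with
  | zero =>
    rw [PySem.Chars.rfind.go]
    by_cases h : sub.isPrefixOf s
    · right
      exact ⟨0, le_refl 0, by simp [h], by simpa [List.isPrefixOf_iff_prefix] using h,
        by omega⟩
    · left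
      refine ⟨by simp [h], ?_⟩
      intro i hi
      interval_cases i
      simpa [List.isPrefixOf_iff_prefix] using h
  | succ j ih =>
    rw [PySem.Chars.rfind.go]
    by_cases h : sub.isPrefixOf (s.drop (j + 1))
    · right
      refine ⟨j + 1, le_refl _, by simp [h], by simpa [List.isPrefixOf_iff_prefix] using h, ?_⟩
      intro i h1 h2
      omega
    · have hnp : ¬ sub <+: s.drop (j + 1) := by
        simpa [List.isPrefixOf_iff_prefix] using h
      rcases ih with ⟨he, hall⟩ | ⟨k, hk, he, hpre, hafter⟩
      · left
        refine ⟨by simp [h, he], ?_⟩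
        intro i hi
        rcases Nat.lt_or_ge i (j + 1) with h' | h'
        · exact hall i (by omega)
        · have : i = j + 1 := by omega
          subst this; exact hnp
      · right
        refine ⟨k, by omega, by simp [h, he], hpre, ?_⟩
        intro i h1 h2
        rcases Nat.lt_or_ge i (j + 1) with h' | h'
        · exact hafter i h1 (by omega)
        · have : i = j + 1 := by omega
          subst this; exact hnp

theorem singleton_prefix_iff (c : Char) (l : List Char) : [c] <+: l ↔ ∃ t, l = c :: t := by
  constructor
  · rintro ⟨u, hu⟩
    exact ⟨u, hu.symm⟩
  · rintro ⟨u, hu⟩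
    exact ⟨u, by simp [hu]⟩

-- if the name contains no dot, no key containing a dot is a suffix of it
theorem not_suffix_of_no_dot (name key : List Char)
    (hnd : ∀ i ≤ name.length, ¬ ['.'] <+: name.drop i) (hk : '.' ∈ key) :
    ¬ key <:+ name := by
  intro hs
  have hmem : '.' ∈ name := hs.subset hk
  rcases List.append_of_mem hmem with ⟨pre, suf, hps⟩
  have hlen : pre.length ≤ name.length := by
    subst hps; simp
  apply hnd pre.length hlen
  rw [hps, List.drop_left' rfl]
  exact ⟨suf, rfl⟩

-- with the last dot of name at position k, a dot-headed dot-free-tailed key is a suffix iff it IS the k-suffix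
theorem suffix_iff_drop (name : List Char) (k : Nat) (t : List Char)
    (hdk : name.drop k = '.' :: t)
    (hafter : ∀ i, k < i → i ≤ name.length → ¬ ['.'] <+: name.drop i)
    (key r : List Char) (hkey : key = '.' :: r) (hr : '.' ∉ r) :
    key <:+ name ↔ name.drop k = key := by
  constructor
  · rintro ⟨pre, hpre⟩
    have hplen : pre.length + key.length = name.length := by
      rw [← hpre]; simp
    have hdp : name.drop pre.length = key := by
      rw [← hpre, List.drop_left' rfl]
    have hple : pre.length ≤ k := by
      by_contra h'
      apply hafter pre.length (by omega) (by omega)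
      rw [hdp, hkey]
      exact ⟨r, rfl⟩
    have hpk : pre.length = k := by
      by_contra h'
      have hlt : pre.length < k := by omega
      have : name.drop k = (name.drop pre.length).drop (k - pre.length) := by
        rw [List.drop_drop]; congr 1; omega
      rw [hdp, hkey] at this
      have hcons : ('.' :: r).drop (k - pre.length) = '.' :: t := by
        rw [← this, hdk]
      have hd1 : k - pre.length = (k - pre.length - 1) + 1 := by omega
      rw [hd1, List.drop_succ_cons] at hcons
      have : '.' ∈ r := by
        have h1 : '.' ∈ r.drop (k - pre.length - 1) := by
          rw [hcons]; exact List.mem_cons_self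
        exact (List.drop_subset _ _) h1
      exact hr this
    rw [← hpk, hdp]
  · intro h
    rw [← h]
    exact List.drop_suffix k name

-- A's scan returns the default when no key matches
theorem ctScan_all_false (ps : List (String × String)) (fn : String)
    (h : ∀ p ∈ ps, PySem.Str.endswith (PySem.Str.lower fn) p.1 = false) :
    ctScan ps fn = "application/octet-stream" := by
  induction ps with
  | nil => rfl
  | cons p rest ih =>
    obtain ⟨e, c⟩ := p
    have he := h (e, c) (by simp)
    simp only [ctScan, he]
    simp only [Bool.false_eq_true, if_false]
    exact ih (fun q hq => h q (by simp [hq]))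

-- A's scan agrees with a first-match lookup when every key's endswith test is equivalent to equality with sfx
theorem ctScan_eq_find (ps : List (String × String)) (fn sfx : String)
    (h : ∀ p ∈ ps, (PySem.Str.endswith (PySem.Str.lower fn) p.1 = true ↔ sfx = p.1)) :
    ctScan ps fn =
      ((ps.find? (fun p => p.1 == sfx)).map Prod.snd).getD "application/octet-stream" := by
  induction ps with
  | nil => rfl
  | cons p rest ih =>
    obtain ⟨e, c⟩ := p
    have he := h (e, c) (by simp)
    by_cases hc : sfx = e
    · simp only [ctScan, he.mpr hc, if_true, List.find?_cons]
      simp [hc]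
    · have : PySem.Str.endswith (PySem.Str.lower fn) e = false := by
        rcases Bool.eq_false_or_eq_true (PySem.Str.endswith (PySem.Str.lower fn) e) with h' | h'
        · exact absurd (he.mp h') hc
        · exact h'
      simp only [ctScan, this, Bool.false_eq_true, if_false, List.find?_cons]
      have : (e == sfx) = false := by simp [Ne.symm hc]
      rw [this]
      exact ih (fun q hq => h q (by simp [hq]))

-- ===== VERDICT (by name: the statement is the Claim_ definition above) =====
theorem hitems_ctPairs : (PySem.Dict.ofList ctPairs).items = ctPairs := by decide

theorem content_type_py_spec : Claim_equal_content_type_py := by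
  intro fn _
  unfold Spec_content_type_py content_type_py content_type_py_alt
  simp only []
  have hdotlist : (".".toList) = ['.'] := by decide
  have hrf : PySem.Str.rfind (PySem.Str.lower fn) "." =
      PySem.Chars.rfind.go (PySem.Str.lower fn).toList ['.'] (PySem.Str.lower fn).toList.length := by
    rw [PySem.Str.rfind_eq, hdotlist, PySem.Chars.rfind]
  rcases rfind_go_spec (PySem.Str.lower fn).toList ['.'] (PySem.Str.lower fn).toList.length with
    ⟨he, hall⟩ | ⟨k, hk, he, hpre, hafter⟩
  · -- no dot in the lowercased name: both return the default
    rw [hrf, he]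
    simp only [BEq.rfl, if_true]
    apply ctScan_all_false
    intro p hp
    have hd : ∀ p ∈ ctPairs, '.' ∈ p.1.toList := by decide
    have hns := not_suffix_of_no_dot (PySem.Str.lower fn).toList p.1.toList
      (fun i hi => hall i hi) (hd p hp)
    rw [PySem.Str.endswith_eq]
    exact Bool.eq_false_iff.mpr (fun h => hns ((PySem.Chars.endswith_iff _ _).mp h))
  · -- last dot at position k: A's matching key is exactly the k-suffix, which B looks up
    rw [hrf, he]
    have hcond : (((k : Int)) == -1) = false := by
      simp only [beq_eq_false_iff_ne, ne_eq]; omega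
    rw [hcond]
    simp only [Bool.false_eq_true, if_false]
    obtain ⟨t, hdk⟩ := (singleton_prefix_iff '.' ((PySem.Str.lower fn).toList.drop k)).mp hpre
    have htl : (PySem.Str.slice (PySem.Str.lower fn) (some ((k : Int))) none).toList =
        (PySem.Str.lower fn).toList.drop k := by
      rw [PySem.Str.toList_slice, PySem.Chars.slice_eq_listSlice, PySem.List.slice_from_natCast]
    simp only [PySem.Dict.getD, PySem.Dict.get?, hitems_ctPairs]
    rw [ctScan_eq_find ctPairs fn (PySem.Str.slice (PySem.Str.lower fn) (some ((k : Int))) none)]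
    intro p hp
    have hkeys : ∀ p ∈ ctPairs, p.1.toList = '.' :: p.1.toList.tail ∧ '.' ∉ p.1.toList.tail := by
      decide
    obtain ⟨hk1, hk2⟩ := hkeys p hp
    rw [PySem.Str.endswith_eq, PySem.Chars.endswith_iff,
      suffix_iff_drop (PySem.Str.lower fn).toList k t hdk hafter p.1.toList p.1.toList.tail hk1 hk2,
      ← htl, String.toList_inj]
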